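-- pv_equiv track=rewrite | github.com/berkdaniels/PythonExercise | a3.py | board_contains_word_in_column
-- ===== SOURCE A (Python) =====
-- def make_str_from_column(board, column_index):
--     stco=''
--     for i in range(len(board)):
--         sublist=board[i]
--         for si in range(len(sublist)):
--             if si == column_index:
--                 stco=stco+sublist[si]
--     return stco
--     """ (list of list of str, int) -> str
--
--     Return the characters from the column of the board with index column_index
--     as a single string.
--
--     >>> make_str_from_column([['A', 'N', 'T', 'T'], ['X', 'S', 'O', 'B']], 1)
--     'NS'
--     """
--
-- def board_contains_word_in_column(board, word):
--     for column_index in range(len(board[0])):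
--             if word in make_str_from_column(board , column_index):
--                 return True
--     return False
--     """ (list of list of str, str) -> bool
--
--     Return True if and only if one or more of the columns of the board
--     contains word.
--
--     Precondition: board has at least one row and one column, and word is a
--     valid word.
--
--     >>> board_contains_word_in_column([['A', 'N', 'T', 'T'], ['X', 'S', 'O', 'B']], 'NO')
--     False
--     """
-- ===== SOURCE B (Python) =====
-- def board_contains_word_in_column(board, word):
--     num_cols = len(board[0])
--     cols = [''] * num_cols
--     for row in board:
--         for si, ch in enumerate(row):
--             if si < num_cols:
--                 cols[si] += ch
--     return any(word in c for c in cols)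
-- ===== Notes on version B (the rewrite author's own statement) =====
-- stated objective: faster
-- what changed: B builds all column strings in one row-major pass over the board (appending row[si] into a cols array bounded by len(board[0])) and then checks the substring once per column, instead of A's re-scanning every cell of the board once per column index.
import Mathlib
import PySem

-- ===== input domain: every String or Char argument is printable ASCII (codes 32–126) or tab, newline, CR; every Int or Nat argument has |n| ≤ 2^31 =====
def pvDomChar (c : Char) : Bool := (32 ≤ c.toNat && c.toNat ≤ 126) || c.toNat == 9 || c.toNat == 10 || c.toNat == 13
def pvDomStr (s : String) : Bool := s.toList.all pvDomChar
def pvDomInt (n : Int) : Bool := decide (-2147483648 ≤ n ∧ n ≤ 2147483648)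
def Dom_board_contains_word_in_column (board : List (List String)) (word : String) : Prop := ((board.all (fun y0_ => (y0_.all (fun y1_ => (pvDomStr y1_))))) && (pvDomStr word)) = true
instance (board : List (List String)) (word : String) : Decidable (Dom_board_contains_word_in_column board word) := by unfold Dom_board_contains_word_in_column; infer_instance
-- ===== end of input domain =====

-- B builds every column string in ONE row-major pass over the board instead of A's
-- rescanning the whole board once per column index (objective: faster).

-- ===== PORT A =====
-- for i in range(len(board)): sublist = board[i]; for si in range(len(sublist)): if si == column_index: stco += sublist[si]
def make_str_from_column (board : List (List String)) (columnIndex : Int) : String :=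
  board.foldl (fun stco sublist =>
    (PySem.List.enumerate sublist 0).foldl
      (fun st p => if p.1 == columnIndex then st ++ p.2 else st) stco) ""

-- board[0] is written board.headD []: Pre_ guarantees board ≠ [], where it equals board[0]
def board_contains_word_in_column (board : List (List String)) (word : String) : Bool :=
  (PySem.List.pyRange 0 ((board.headD []).length : Int) 1).any
    (fun columnIndex => PySem.Str.isIn word (make_str_from_column board columnIndex))

-- ===== PORT B =====
-- one pass: cols[si] += ch for every (si, ch) of every row, bounded by num_cols = len(board[0])
def board_contains_word_in_column_alt (board : List (List String)) (word : String) : Bool :=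
  let numCols := (board.headD []).length
  let cols := board.foldl (fun cols row =>
      (PySem.List.enumerate row 0).foldl
        (fun cols p =>
          if p.1 < (numCols : Int) then cols.set p.1.toNat (cols[p.1.toNat]! ++ p.2) else cols)
        cols)
    (List.replicate numCols "")
  cols.any (fun c => PySem.Str.isIn word c)

-- ===== PRECONDITION & SPEC =====
-- Pre_ excludes only the empty board, on which Python A raises IndexError at board[0]
def Pre_board_contains_word_in_column (board : List (List String)) (word : String) : Prop :=
  board ≠ []
instance (board : List (List String)) (word : String) : Decidable (Pre_board_contains_word_in_column board word) := by unfold Pre_board_contains_word_in_column; infer_instance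

def pvWitness_board_contains_word_in_column : List (List String) × String :=
  ([["A", "N", "T", "T"], ["X", "S", "O", "B"]], "NO")

def Spec_board_contains_word_in_column (board : List (List String)) (word : String) (out : Bool) : Prop := out = board_contains_word_in_column_alt board word
instance (board : List (List String)) (word : String) (out : Bool) : Decidable (Spec_board_contains_word_in_column board word out) := by unfold Spec_board_contains_word_in_column; infer_instance

-- ===== CLAIM (what is proved, stated in full; the proofs are below) =====
def Claim_equal_board_contains_word_in_column : Prop := ∀ (board : List (List String)) (word : String), Dom_board_contains_word_in_column board word → Pre_board_contains_word_in_column board word → Spec_board_contains_word_in_column board word (board_contains_word_in_column board word)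

-- ===== LEMMAS AND PROOFS =====

-- the entry of `row` that lands at absolute column c when the row starts at offset s ("" if out of range)
def pvPick (row : List String) (s c : Int) : String :=
  if h : 0 ≤ c - s ∧ (c - s).toNat < row.length then row[(c - s).toNat] else ""

-- the full column string at column c (what one outer iteration of A contributes per row)
def pvColA (board : List (List String)) (c : Int) : String :=
  board.foldl (fun st row => st ++ pvPick row 0 c) ""

theorem pvPick_nil (s c : Int) : pvPick [] s c = "" := by
  simp [pvPick]

theorem pvPick_cons (x : String) (xs : List String) (s c : Int) :
    pvPick (x :: xs) s c = if s = c then x else pvPick xs (s + 1) c := by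
  unfold pvPick
  by_cases h : s = c
  · subst h
    rw [if_pos rfl, dif_pos (by constructor <;> simp)]
    simp
  · rw [if_neg h]
    by_cases h1 : 0 ≤ c - (s + 1) ∧ (c - (s + 1)).toNat < xs.length
    · rw [dif_pos h1, dif_pos (by constructor <;> [omega; (simp; omega)])]
      have hk : (c - s).toNat = (c - (s + 1)).toNat + 1 := by omega
      simp only [hk, List.getElem_cons_succ]
    · rw [dif_neg h1, dif_neg (by simp only [List.length_cons]; omega)]

theorem pv_str_append_empty (s : String) : s ++ "" = s := by simp

theorem pv_foldl_str_append {α : Type} (g : α → String) :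
    ∀ (l : List α) (a : String),
      l.foldl (fun st x => st ++ g x) a = a ++ l.foldl (fun st x => st ++ g x) "" := by
  intro l
  induction l with
  | nil => intro a; simp
  | cons x xs ih =>
    intro a
    simp only [List.foldl_cons]
    rw [ih (a ++ g x), ih ("" ++ g x)]
    simp [String.append_assoc]

theorem pv_innerA (c : Int) :
    ∀ (row : List String) (s : Int) (st : String),
      (PySem.List.enumerate row s).foldl
        (fun st p => if p.1 == c then st ++ p.2 else st) st = st ++ pvPick row s c := by
  intro row
  induction row with
  | nil => intro s st; simp [PySem.List.enumerate_nil, pvPick_nil]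
  | cons x xs ih =>
    intro s st
    rw [PySem.List.enumerate_cons, List.foldl_cons, ih, pvPick_cons]
    by_cases h : s = c
    · simp only [h, beq_self_eq_true, if_true]
      have : pvPick xs (c + 1) c = "" := by unfold pvPick; rw [dif_neg]; omega
      simp [this]
    · have hb : (s == c) = false := by simpa using h
      simp [hb, h]

theorem pv_makeStr_eq (board : List (List String)) (c : Int) :
    make_str_from_column board c = pvColA board c := by
  unfold make_str_from_column pvColA
  apply List.foldl_ext
  intro a row _
  exact pv_innerA c row 0 a

theorem pv_innerB (n : Nat) :
    ∀ (row : List String) (s : Int) (acc : List String), 0 ≤ s → acc.length = n →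
      ((PySem.List.enumerate row s).foldl
        (fun cols p =>
          if p.1 < (n : Int) then cols.set p.1.toNat (cols[p.1.toNat]! ++ p.2) else cols)
        acc).length = n ∧
      ∀ i : Nat, i < n →
        ((PySem.List.enumerate row s).foldl
          (fun cols p =>
            if p.1 < (n : Int) then cols.set p.1.toNat (cols[p.1.toNat]! ++ p.2) else cols)
          acc)[i]! = acc[i]! ++ pvPick row s (i : Int) := by
  intro row
  induction row with
  | nil =>
    intro s acc _ hlen
    refine ⟨by simpa [PySem.List.enumerate_nil] using hlen, ?_⟩
    intro i hi
    simp [PySem.List.enumerate_nil, pvPick_nil]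
  | cons x xs ih =>
    intro s acc hs hlen
    rw [PySem.List.enumerate_cons]
    simp only [List.foldl_cons]
    set acc' : List String :=
      if (s : Int) < (n : Int) then acc.set s.toNat (acc[s.toNat]! ++ x) else acc with hacc'
    have hlen' : acc'.length = n := by
      rw [hacc']; split_ifs <;> simp [hlen]
    obtain ⟨h1, h2⟩ := ih (s + 1) acc' (by omega) hlen'
    refine ⟨h1, ?_⟩
    intro i hi
    rw [h2 i hi, pvPick_cons]
    by_cases heq : s = (i : Int)
    · have hsn : (s : Int) < (n : Int) := by omega
      have hst : s.toNat = i := by omega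
      have hilt : i < acc.length := by omega
      have : acc'[i]! = acc[i]! ++ x := by
        rw [hacc', if_pos hsn, hst]
        have hl2 : i < (acc.set i (acc[i]! ++ x)).length := by simpa using hilt
        rw [getElem!_pos _ i hl2]
        simp
      rw [this, if_pos heq]
      have : pvPick xs (s + 1) (i : Int) = "" := by unfold pvPick; rw [dif_neg]; omega
      rw [this, pv_str_append_empty]
    · have : acc'[i]! = acc[i]! := by
        rw [hacc']
        split_ifs with hc
        · have hne : s.toNat ≠ i := by omega
          have hilt : i < acc.length := by omega
          rw [getElem!_pos _ i (by simpa [hlen] using hi),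
              getElem!_pos _ i hilt, List.getElem_set_ne hne]
        · rfl
      rw [this, if_neg heq]

theorem pv_colsB (n : Nat) :
    ∀ (board : List (List String)) (acc : List String), acc.length = n →
      (board.foldl (fun cols row =>
        (PySem.List.enumerate row 0).foldl
          (fun cols p =>
            if p.1 < (n : Int) then cols.set p.1.toNat (cols[p.1.toNat]! ++ p.2) else cols)
          cols) acc).length = n ∧
      ∀ i : Nat, i < n →
        (board.foldl (fun cols row =>
          (PySem.List.enumerate row 0).foldl
            (fun cols p =>
              if p.1 < (n : Int) then cols.set p.1.toNat (cols[p.1.toNat]! ++ p.2) else cols)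
            cols) acc)[i]! = acc[i]! ++ pvColA board (i : Int) := by
  intro board
  induction board with
  | nil =>
    intro acc hlen
    exact ⟨hlen, fun i hi => by simp [pvColA]⟩
  | cons r bs ih =>
    intro acc hlen
    simp only [List.foldl_cons]
    obtain ⟨h1, h2⟩ := pv_innerB n r 0 acc (by omega) hlen
    obtain ⟨h1', h2'⟩ := ih _ h1
    refine ⟨h1', ?_⟩
    intro i hi
    rw [h2' i hi, h2 i hi]
    have hcol : pvColA (r :: bs) (i : Int) = pvPick r 0 (i : Int) ++ pvColA bs (i : Int) := by
      unfold pvColA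
      rw [List.foldl_cons]
      have := pv_foldl_str_append (fun row => pvPick row 0 (i : Int)) bs ("" ++ pvPick r 0 (i : Int))
      simpa using this
    rw [hcol, String.append_assoc]

theorem pv_mem_pyRange_len (n : Nat) (c : Int) :
    c ∈ PySem.List.pyRange 0 (n : Int) 1 ↔ 0 ≤ c ∧ c < (n : Int) := by
  rw [PySem.List.mem_pyRange_iff_of_pos (by norm_num)]
  constructor
  · rintro ⟨hl, hu, -⟩; exact ⟨hl, hu⟩
  · rintro ⟨hl, hu⟩; exact ⟨hl, hu, by omega⟩

-- ===== VERDICT (by name: the statement is the Claim_ definition above) =====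
theorem board_contains_word_in_column_spec : Claim_equal_board_contains_word_in_column := by
  intro board word _ _
  unfold Spec_board_contains_word_in_column
  simp only [board_contains_word_in_column, board_contains_word_in_column_alt]
  set n := (board.headD []).length with hn
  obtain ⟨hlen, hget⟩ := pv_colsB n board (List.replicate n "") (by simp)
  set cols := board.foldl (fun cols row =>
    (PySem.List.enumerate row 0).foldl
      (fun cols p =>
        if p.1 < (n : Int) then cols.set p.1.toNat (cols[p.1.toNat]! ++ p.2) else cols)
      cols) (List.replicate n "") with hcols
  have hcol : ∀ i : Nat, i < n → cols[i]! = pvColA board (i : Int) := by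
    intro i hi
    rw [hget i hi, getElem!_pos _ i (by simpa using hi)]
    simp
  rw [Bool.eq_iff_iff, List.any_eq_true, List.any_eq_true]
  constructor
  · rintro ⟨c, hc, hin⟩
    rw [pv_mem_pyRange_len] at hc
    refine ⟨cols[c.toNat]!, ?_, ?_⟩
    · have hclt : c.toNat < cols.length := by omega
      rw [getElem!_pos cols c.toNat hclt]
      exact List.getElem_mem hclt
    · rw [hcol c.toNat (by omega)]
      have : ((c.toNat : Nat) : Int) = c := by omega
      rw [this, ← pv_makeStr_eq]
      exact hin
  · rintro ⟨x, hx, hin⟩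
    obtain ⟨i, hi, hxi⟩ := List.mem_iff_getElem.mp hx
    have hin' : i < n := by omega
    refine ⟨(i : Int), ?_, ?_⟩
    · rw [pv_mem_pyRange_len]; omega
    · rw [pv_makeStr_eq, ← hcol i hin']
      rw [getElem!_pos _ i hi, hxi]
      exact hin
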